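-- pv_equiv track=rewrite | github.com/jmanhype/ace-adaptive-code-evolution | python_demo/memory_waste.py | slow_matrix_operations
-- ===== SOURCE A (Python) =====
-- from typing import List, Dict, Tuple, Optional
--
-- def slow_matrix_operations(size: int) -> List[List[int]]:
--     """
--     Performs inefficient matrix operations.
--
--     Args:
--         size: Size of the matrix
--
--     Returns:
--         A matrix with computed values
--     """
--     # Inefficient matrix creation
--     matrix = []
--     for i in range(size):
--         row = []
--         for j in range(size):
--             row.append(i * j)
--         matrix.append(row)
--
--     # Inefficient matrix transposition
--     transposed = []
--     for i in range(size):
--         new_row = []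
--         for j in range(size):
--             new_row.append(matrix[j][i])
--         transposed.append(new_row)
--
--     return transposed
-- ===== SOURCE B (Python) =====
-- def slow_matrix_operations(size: int) -> list:
--     # the i*j matrix is symmetric, so the transpose equals the matrix itself:
--     # build the result directly in one pass.
--     return [[i * j for j in range(size)] for i in range(size)]
-- ===== Notes on version B (the rewrite author's own statement) =====
-- stated objective: simpler
-- what changed: B builds the result in a single double comprehension, exploiting the symmetry of the i*j matrix to drop A's intermediate matrix and its whole transpose pass.
import Mathlib
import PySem

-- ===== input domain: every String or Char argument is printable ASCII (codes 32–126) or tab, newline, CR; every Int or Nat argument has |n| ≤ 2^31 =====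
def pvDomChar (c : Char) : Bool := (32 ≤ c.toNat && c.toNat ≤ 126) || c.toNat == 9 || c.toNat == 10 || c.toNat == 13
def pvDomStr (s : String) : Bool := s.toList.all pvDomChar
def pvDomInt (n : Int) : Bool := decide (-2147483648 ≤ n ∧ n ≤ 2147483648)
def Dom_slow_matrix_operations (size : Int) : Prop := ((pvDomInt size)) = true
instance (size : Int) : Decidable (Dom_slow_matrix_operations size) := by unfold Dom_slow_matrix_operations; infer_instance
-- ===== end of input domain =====

-- B replaces A's build-then-transpose double pass by one direct comprehension
-- (the i*j matrix is symmetric); equivalence of return values is proved below.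

-- ===== PORT A =====
-- A step for step, its four loops kept as four folds (the inner loops named as
-- helpers). Python's list is a dynamic array (O(1) append and O(1) index), so
-- the mutable accumulators are Arrays here, converted to List at the return.
-- matrix[j][i] is read with getD at j.toNat/i.toNat: exact, because j and i
-- come from range(size), hence are nonnegative and in range, so Python's
-- indexing is plain positional (no negative wraparound, no IndexError).

-- inner loop 'for j in range(size): row.append(i * j)'
def pvRowA (size i : Int) : Array Int :=
  (PySem.List.pyRange 0 size 1).foldl (fun r j => r.push (i * j)) #[]

-- first loop nest: 'matrix'
def pvMatrixA (size : Int) : Array (Array Int) :=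
  (PySem.List.pyRange 0 size 1).foldl (fun m i => m.push (pvRowA size i)) #[]

-- inner loop 'for j in range(size): new_row.append(matrix[j][i])'
def pvTRowA (size : Int) (matrix : Array (Array Int)) (i : Int) : Array Int :=
  (PySem.List.pyRange 0 size 1).foldl
    (fun r j => r.push ((matrix.getD j.toNat #[]).getD i.toNat 0)) #[]

def slow_matrix_operations (size : Int) : List (List Int) :=
  let matrix := pvMatrixA size
  let transposed : Array (Array Int) :=
    (PySem.List.pyRange 0 size 1).foldl (fun t i => t.push (pvTRowA size matrix i)) #[]
  (transposed.map Array.toList).toList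

-- ===== PORT B =====
def slow_matrix_operations_alt (size : Int) : List (List Int) :=
  let rng := PySem.List.pyRange 0 size 1
  rng.map (fun i => rng.map (fun j => i * j))

-- ===== PRECONDITION & SPEC =====
def Spec_slow_matrix_operations (size : Int) (out : List (List Int)) : Prop := out = slow_matrix_operations_alt size
instance (size : Int) (out : List (List Int)) : Decidable (Spec_slow_matrix_operations size out) := by unfold Spec_slow_matrix_operations; infer_instance

-- ===== CLAIM (what is proved, stated in full; the proofs are below) =====
def Claim_equal_slow_matrix_operations : Prop := ∀ (size : Int), Dom_slow_matrix_operations size → Spec_slow_matrix_operations size (slow_matrix_operations size)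

-- ===== LEMMAS AND PROOFS =====

-- the 'acc.append(f x)' loop, seen through toList
theorem pv_foldl_push_toList {α β : Type} (l : List α) (f : α → β) (init : Array β) :
    (l.foldl (fun a x => a.push (f x)) init).toList = init.toList ++ l.map f := by
  induction l generalizing init with
  | nil => simp
  | cons x xs ih => rw [List.foldl_cons, ih]; simp

theorem pv_array_getD_toList {α : Type} (a : Array α) (n : Nat) (d : α) :
    a.getD n d = a.toList.getD n d := by
  rcases Nat.lt_or_ge n a.size with h | h
  · simp [Array.getD, h, Array.getElem_toList]
  · simp [Array.getD, Nat.not_lt.mpr h]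

-- indexing a comprehension over range(size) at a valid Nat index
theorem pv_getD_map_pyRange_zero {β : Type} (f : Int → β) (size : Int) (k : Nat) (d : β)
    (hk : (k : Int) < size) :
    ((PySem.List.pyRange 0 size 1).map f).getD k d = f k := by
  have hlen : k < ((PySem.List.pyRange 0 size 1).map f).length := by
    simp [PySem.List.length_pyRange_one]; omega
  rw [List.getD_eq_getElem _ _ hlen, List.getElem_map, PySem.List.getElem_pyRange_one]
  simp

theorem pv_rowA_toList (size i : Int) :
    (pvRowA size i).toList = (PySem.List.pyRange 0 size 1).map (fun j => i * j) := by
  rw [pvRowA, pv_foldl_push_toList]; rfl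

theorem pv_matrixA_toList (size : Int) :
    (pvMatrixA size).toList = (PySem.List.pyRange 0 size 1).map (pvRowA size) := by
  rw [pvMatrixA, pv_foldl_push_toList]; rfl

-- matrix[j][i] = j * i for in-range indices
theorem pv_matrixA_entry (size i j : Int) (hi : 0 ≤ i ∧ i < size) (hj : 0 ≤ j ∧ j < size) :
    ((pvMatrixA size).getD j.toNat #[]).getD i.toNat 0 = j * i := by
  rw [pv_array_getD_toList (pvMatrixA size), pv_matrixA_toList,
    pv_getD_map_pyRange_zero _ _ _ _ (by omega : ((j.toNat : Nat) : Int) < size),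
    pv_array_getD_toList, pv_rowA_toList,
    pv_getD_map_pyRange_zero _ _ _ _ (by omega : ((i.toNat : Nat) : Int) < size),
    Int.toNat_of_nonneg hj.1, Int.toNat_of_nonneg hi.1]

theorem pv_tRowA_toList (size i : Int) (hi : 0 ≤ i ∧ i < size) :
    (pvTRowA size (pvMatrixA size) i).toList = (PySem.List.pyRange 0 size 1).map (fun j => i * j) := by
  rw [pvTRowA, pv_foldl_push_toList, List.nil_append]
  refine List.map_congr_left ?_
  intro j hj
  rw [PySem.List.mem_pyRange_one] at hj
  rw [pv_matrixA_entry size i j hi hj, mul_comm]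

-- ===== VERDICT (by name: the statement is the Claim_ definition above) =====
theorem slow_matrix_operations_spec : Claim_equal_slow_matrix_operations := by
  intro size _
  show _ = _
  rw [slow_matrix_operations, slow_matrix_operations_alt]
  rw [Array.toList_map, pv_foldl_push_toList, List.nil_append, List.map_map]
  refine List.map_congr_left ?_
  intro i hi
  rw [PySem.List.mem_pyRange_one] at hi
  exact pv_tRowA_toList size i hi
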